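-- pv_equiv track=rewrite | github.com/PRDicta/Solitaire | solitaire/core/format_adapter.py | _render_claude
-- ===== SOURCE A (Python) =====
-- from typing import Dict, Optional
--
-- def _render_claude(blocks: Dict[str, str]) -> str:
--     """
--     Claude format: sections wrapped in ═══ delimiters.
--
--     This is the current production format. Blocks are already formatted
--     with their own delimiters (e.g., ═══ COGNITIVE PROFILE ═══), so
--     we join them with double newlines.
--     """
--     parts = []
--     # Ordered rendering: profile first, then identity, then episodic
--     section_order = [
--         "cognitive_profile",
--         "experiential",
--         "user_knowledge",
--         "resident_knowledge",
--         "identity",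
--         "commitments",
--         "briefing",
--         "residue",
--         "session_tail",
--         "intent",
--         "tool_proposals",
--     ]
--
--     for key in section_order:
--         if key in blocks and blocks[key]:
--             parts.append(blocks[key].strip())
--
--     # Append any blocks not in the ordered list
--     for key, val in blocks.items():
--         if key not in section_order and val:
--             parts.append(val.strip())
--
--     return "\n\n".join(parts)
-- ===== SOURCE B (Python) =====
-- def _render_claude(blocks):
--     """Bucket-sort formulation: one pass over the items distributes stripped
--     truthy values into rank buckets (listed sections by index, unknown keys
--     into the last bucket, keeping insertion order), then flatten and join."""
--     section_order = [
--         "cognitive_profile",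
--         "experiential",
--         "user_knowledge",
--         "resident_knowledge",
--         "identity",
--         "commitments",
--         "briefing",
--         "residue",
--         "session_tail",
--         "intent",
--         "tool_proposals",
--     ]
--     n = len(section_order)
--     rank = {name: i for i, name in enumerate(section_order)}
--     buckets = [[] for _ in range(n + 1)]
--     for key, val in blocks.items():
--         if val:
--             buckets[rank.get(key, n)].append(val.strip())
--     return "\n\n".join(s for bucket in buckets for s in bucket)
-- ===== Notes on version B (the rewrite author's own statement) =====
-- stated objective: alternative
-- what changed: Replaces A's two sequential scans (a pass over the fixed section order with a dict lookup per section, then a pass over the dict items) by a precomputed name-to-rank table and a single bucket-distribution pass over the items, flattening the buckets at the end.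
import Mathlib
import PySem

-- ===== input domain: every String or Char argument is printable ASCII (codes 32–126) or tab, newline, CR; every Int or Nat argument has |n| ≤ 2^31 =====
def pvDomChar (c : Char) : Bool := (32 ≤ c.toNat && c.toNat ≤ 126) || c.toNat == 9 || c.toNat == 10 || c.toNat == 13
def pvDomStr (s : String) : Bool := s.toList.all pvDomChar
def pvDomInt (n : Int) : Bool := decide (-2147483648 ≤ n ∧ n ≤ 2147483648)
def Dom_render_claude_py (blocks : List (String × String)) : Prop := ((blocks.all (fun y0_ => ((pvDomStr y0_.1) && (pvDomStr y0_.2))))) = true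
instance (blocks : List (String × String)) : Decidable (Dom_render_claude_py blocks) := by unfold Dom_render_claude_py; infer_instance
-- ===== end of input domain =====

-- B replaces A's two sequential scans (one over the fixed section order with a dict lookup each, then one
-- over the dict items) by a rank table and a single bucket-distribution pass over the items; objective: alternative.

-- ===== PORT A =====
-- the fixed section order of _render_claude
def sectionOrder : List String :=
  ["cognitive_profile", "experiential", "user_knowledge", "resident_knowledge", "identity",
   "commitments", "briefing", "residue", "session_tail", "intent", "tool_proposals"]

def render_claude_py (blocks : List (String × String)) : String :=
  let d : PySem.Dict String String := ⟨blocks⟩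
  -- for key in section_order: if key in blocks and blocks[key]: parts.append(blocks[key].strip())
  let parts : List String := sectionOrder.foldl (fun parts key =>
      match d.get? key with
      | some v => if v != "" then parts ++ [PySem.Str.strip v] else parts
      | none => parts) []
  -- for key, val in blocks.items(): if key not in section_order and val: parts.append(val.strip())
  let parts : List String := blocks.foldl (fun parts kv =>
      if !sectionOrder.contains kv.1 && kv.2 != "" then parts ++ [PySem.Str.strip kv.2] else parts) parts
  PySem.Str.join "\n\n" parts

-- ===== PORT B =====
-- rank = {name: i for i, name in enumerate(section_order)}
def pvRank : PySem.Dict String Int :=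
  PySem.Dict.ofList ((PySem.List.enumerate sectionOrder).map (fun p => (p.2, p.1)))

def render_claude_py_alt (blocks : List (String × String)) : String :=
  let n := sectionOrder.length
  let buckets : List (List String) := List.replicate (n + 1) []
  -- for key, val in blocks.items(): if val: buckets[rank.get(key, n)].append(val.strip())
  -- (rank values are 0..n, all nonnegative, so .toNat is exact here)
  let buckets := blocks.foldl (fun bs kv =>
      if kv.2 != "" then bs.modify (pvRank.getD kv.1 (n : Int)).toNat (· ++ [PySem.Str.strip kv.2]) else bs) buckets
  PySem.Str.join "\n\n" buckets.flatten

-- ===== PRECONDITION & SPEC =====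
-- Pre_ excludes association lists with duplicate keys: they represent no Python dict (a dict literal
-- collapses them), and the two ports' lookup-vs-per-item treatments disagree only there.
def Pre_render_claude_py (blocks : List (String × String)) : Prop := (blocks.map Prod.fst).Nodup
instance (blocks : List (String × String)) : Decidable (Pre_render_claude_py blocks) := by unfold Pre_render_claude_py; infer_instance
def pvWitness_render_claude_py : (List (String × String)) := [("identity", " me "), ("extra", "x"), ("briefing", "")]

def Spec_render_claude_py (blocks : List (String × String)) (out : String) : Prop := out = render_claude_py_alt blocks
instance (blocks : List (String × String)) (out : String) : Decidable (Spec_render_claude_py blocks out) := by unfold Spec_render_claude_py; infer_instance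

-- ===== CLAIM (what is proved, stated in full; the proofs are below) =====
def Claim_equal_render_claude_py : Prop := ∀ (blocks : List (String × String)), Dom_render_claude_py blocks → Pre_render_claude_py blocks → Spec_render_claude_py blocks (render_claude_py blocks)

-- ===== LEMMAS AND PROOFS =====

-- the per-section contribution, as A computes it (lookup, truthiness test, strip)
def pvE (blocks : List (String × String)) (k : String) : List String :=
  match (PySem.Dict.mk blocks).get? k with
  | some v => if v != "" then [PySem.Str.strip v] else []
  | none => []

-- the content of bucket j after B's distribution pass
def pvC (blocks : List (String × String)) (j : Nat) : List String :=
  (blocks.filter (fun kv => kv.2 != "" && ((pvRank.getD kv.1 (sectionOrder.length : Int)).toNat == j))).map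
    (fun kv => PySem.Str.strip kv.2)

lemma pvRank_keys : pvRank.keys = sectionOrder := by decide

lemma pvRank_getD_of_not_mem (k : String) (h : k ∉ sectionOrder) :
    pvRank.getD k (sectionOrder.length : Int) = (sectionOrder.length : Int) := by
  have h0 : pvRank.get? k = none := by
    rw [PySem.Dict.get?_eq_none_iff_not_mem_keys, pvRank_keys]; exact h
  simp [PySem.Dict.getD, h0]

lemma pv_getElem?_eq (j : Nat) (hj : j < 11) : sectionOrder[j]? = some (sectionOrder.getD j "") := by
  interval_cases j <;> decide

lemma pvRank_getD_mem' (i : Nat) (hi : i < 11) (k : String) (he : sectionOrder[i]? = some k) :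
    pvRank.getD k (sectionOrder.length : Int) = (i : Int) := by
  interval_cases i <;> (simp [sectionOrder] at he; subst he; decide)

lemma pvIdx_eq_iff (k : String) (j : Nat) (hj : j < 11) :
    ((pvRank.getD k (sectionOrder.length : Int)).toNat == j) = (k == sectionOrder.getD j "") := by
  by_cases hk : k ∈ sectionOrder
  · obtain ⟨i, he⟩ := List.mem_iff_getElem?.mp hk
    have hi : i < 11 := by
      have := List.getElem?_eq_some_iff.mp he
      simpa [sectionOrder] using this.1
    rw [pvRank_getD_mem' i hi k he]
    by_cases hij : i = j
    · subst hij
      have hk2 : k = sectionOrder.getD i "" := by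
        rw [pv_getElem?_eq i hi] at he; exact (Option.some_inj.mp he).symm
      simp [hk2]
    · have h1 : ((i : Int).toNat == j) = false := by simp [hij]
      rw [h1]
      have h2 : k ≠ sectionOrder.getD j "" := by
        intro hkm
        apply hij
        refine List.getElem?_inj (xs := sectionOrder) (i := i) (j := j) (by simpa [sectionOrder] using hi) (by decide) ?_
        rw [he, pv_getElem?_eq j hj, hkm]
      exact (beq_eq_false_iff_ne.mpr h2).symm
  · rw [pvRank_getD_of_not_mem k hk]
    have h1 : (((sectionOrder.length : Int)).toNat == j) = false := by
      simp [sectionOrder]; omega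
    rw [h1]
    have h2 : k ≠ sectionOrder.getD j "" := by
      intro hkm
      apply hk
      rw [hkm, List.getD_eq_getElem _ _ (by simpa [sectionOrder] using hj)]
      exact List.getElem_mem _
    exact (beq_eq_false_iff_ne.mpr h2).symm

lemma pvIdx_eq_top_iff (k : String) :
    ((pvRank.getD k (sectionOrder.length : Int)).toNat == 11) = !sectionOrder.contains k := by
  by_cases hk : k ∈ sectionOrder
  · obtain ⟨i, he⟩ := List.mem_iff_getElem?.mp hk
    have hi : i < 11 := by
      have := List.getElem?_eq_some_iff.mp he
      simpa [sectionOrder] using this.1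
    rw [pvRank_getD_mem' i hi k he]
    have h1 : ((i : Int).toNat == 11) = false := by simp; omega
    rw [h1]
    simp [hk]
  · rw [pvRank_getD_of_not_mem k hk]
    simp [hk]
    decide

lemma pv_foldl_buckets_length (l : List (String × String)) (bs : List (List String)) :
    (l.foldl (fun bs kv =>
      if kv.2 != "" then bs.modify (pvRank.getD kv.1 (sectionOrder.length : Int)).toNat (· ++ [PySem.Str.strip kv.2]) else bs) bs).length = bs.length := by
  induction l generalizing bs with
  | nil => rfl
  | cons kv t ih =>
    simp only [List.foldl_cons]
    split
    · rw [ih, List.length_modify]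
    · exact ih bs

lemma pv_foldl_buckets_getElem (l : List (String × String)) (bs : List (List String)) (j : Nat) (hj : j < bs.length) :
    (l.foldl (fun bs kv =>
      if kv.2 != "" then bs.modify (pvRank.getD kv.1 (sectionOrder.length : Int)).toNat (· ++ [PySem.Str.strip kv.2]) else bs) bs)[j]?
    = some (bs[j] ++ pvC l j) := by
  induction l generalizing bs with
  | nil => simp [pvC, List.getElem?_eq_getElem hj]
  | cons kv t ih =>
    simp only [List.foldl_cons]
    by_cases hv : (kv.2 != "") = true
    · rw [if_pos hv]
      rw [ih _ (by rw [List.length_modify]; exact hj)]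
      by_cases hidx : (pvRank.getD kv.1 (sectionOrder.length : Int)).toNat = j
      · have hfil : (kv :: t).filter (fun kv => kv.2 != "" && ((pvRank.getD kv.1 (sectionOrder.length : Int)).toNat == j))
            = kv :: t.filter (fun kv => kv.2 != "" && ((pvRank.getD kv.1 (sectionOrder.length : Int)).toNat == j)) := by
          rw [List.filter_cons_of_pos]
          simp [hv, hidx]
        simp [pvC, hfil, hidx]
      · have hfil : (kv :: t).filter (fun kv => kv.2 != "" && ((pvRank.getD kv.1 (sectionOrder.length : Int)).toNat == j))
            = t.filter (fun kv => kv.2 != "" && ((pvRank.getD kv.1 (sectionOrder.length : Int)).toNat == j)) := by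
          rw [List.filter_cons_of_neg]
          simp [hidx]
        simp [pvC, hfil, hidx]
    · rw [if_neg hv]
      rw [ih bs hj]
      have hfil : (kv :: t).filter (fun kv => kv.2 != "" && ((pvRank.getD kv.1 (sectionOrder.length : Int)).toNat == j))
          = t.filter (fun kv => kv.2 != "" && ((pvRank.getD kv.1 (sectionOrder.length : Int)).toNat == j)) := by
        rw [List.filter_cons_of_neg]
        simp at hv
        simp [hv]
      simp [pvC, hfil]

lemma pv_filter_none (l : List (String × String)) (k : String) (h : k ∉ l.map Prod.fst) :
    l.filter (fun kv => kv.2 != "" && kv.1 == k) = [] := by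
  induction l with
  | nil => rfl
  | cons kv t ih =>
    simp only [List.map_cons, List.mem_cons, not_or] at h
    have hb : (kv.1 == k) = false := beq_eq_false_iff_ne.mpr (fun he => h.1 he.symm)
    rw [List.filter_cons_of_neg (by simp [hb]), ih h.2]

lemma pv_filter_key_nodup (l : List (String × String)) (h : (l.map Prod.fst).Nodup) (k : String) :
    (l.filter (fun kv => kv.2 != "" && kv.1 == k)).map (fun kv => PySem.Str.strip kv.2) = pvE l k := by
  induction l with
  | nil => rfl
  | cons kv t ih =>
    obtain ⟨a, b⟩ := kv
    rw [List.map_cons, List.nodup_cons] at h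
    by_cases hk : a = k
    · subst hk
      by_cases hv : (b != "") = true
      · rw [List.filter_cons_of_pos (by simp [hv])]
        simp [pvE, PySem.Dict.get?_mk_cons, hv, pv_filter_none t a h.1]
      · rw [List.filter_cons_of_neg (by simp at hv; simp [hv])]
        simp at hv
        simp [pvE, PySem.Dict.get?_mk_cons, hv, pv_filter_none t a h.1]
    · have hb : (a == k) = false := beq_eq_false_iff_ne.mpr hk
      rw [List.filter_cons_of_neg (by simp [hb])]
      rw [ih h.2]
      simp [pvE, PySem.Dict.get?_mk_cons, hb]

lemma pvC_eq_E (blocks : List (String × String)) (h : (blocks.map Prod.fst).Nodup) (j : Nat) (hj : j < 11) :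
    pvC blocks j = pvE blocks (sectionOrder.getD j "") := by
  unfold pvC
  rw [List.filter_congr (fun kv _ => by rw [pvIdx_eq_iff kv.1 j hj])]
  exact pv_filter_key_nodup blocks h _

lemma pvA_first (blocks : List (String × String)) (l : List String) (acc : List String) :
    l.foldl (fun parts key => match (PySem.Dict.mk blocks).get? key with
      | some v => if v != "" then parts ++ [PySem.Str.strip v] else parts
      | none => parts) acc = acc ++ (l.map (pvE blocks)).flatten := by
  induction l generalizing acc with
  | nil => simp
  | cons k t ih =>
    simp only [List.foldl_cons, List.map_cons, List.flatten_cons]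
    cases hg : (PySem.Dict.mk blocks).get? k with
    | none => rw [ih]; simp [pvE, hg]
    | some v =>
      rw [ih]
      by_cases hv : (v != "") = true
      · simp [pvE, hg, hv]
      · simp at hv; simp [pvE, hg, hv]

lemma pv_buckets_eq (blocks : List (String × String)) :
    (blocks.foldl (fun bs kv =>
      if kv.2 != "" then bs.modify (pvRank.getD kv.1 (sectionOrder.length : Int)).toNat (· ++ [PySem.Str.strip kv.2]) else bs)
      (List.replicate (sectionOrder.length + 1) []))
    = (List.range (sectionOrder.length + 1)).map (fun j => pvC blocks j) := by
  apply List.ext_getElem?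
  intro i
  by_cases hi : i < sectionOrder.length + 1
  · rw [pv_foldl_buckets_getElem blocks _ i (by simpa using hi)]
    simp [List.getElem?_map, List.getElem?_range hi, List.getElem_replicate]
  · have h1 : (blocks.foldl (fun bs kv =>
        if kv.2 != "" then bs.modify (pvRank.getD kv.1 (sectionOrder.length : Int)).toNat (· ++ [PySem.Str.strip kv.2]) else bs)
        (List.replicate (sectionOrder.length + 1) [])).length = sectionOrder.length + 1 := by
      rw [pv_foldl_buckets_length]; simp
    rw [List.getElem?_eq_none (by rw [h1]; omega), List.getElem?_eq_none (by simp; omega)]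

lemma pv_range_map_C (blocks : List (String × String)) (h : (blocks.map Prod.fst).Nodup) :
    (List.range sectionOrder.length).map (fun j => pvC blocks j) = sectionOrder.map (pvE blocks) := by
  apply List.ext_getElem?
  intro i
  by_cases hi : i < 11
  · rw [List.getElem?_map, List.getElem?_map, List.getElem?_range (by simpa [sectionOrder] using hi),
        pv_getElem?_eq i hi]
    simp [pvC_eq_E blocks h i hi]
  · rw [List.getElem?_eq_none, List.getElem?_eq_none]
    · simp [sectionOrder]; omega
    · simp [sectionOrder]; omega

lemma pvC_top (blocks : List (String × String)) :
    pvC blocks sectionOrder.length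
      = (blocks.filter (fun kv => !sectionOrder.contains kv.1 && kv.2 != "")).map (fun kv => PySem.Str.strip kv.2) := by
  unfold pvC
  rw [List.filter_congr (fun kv _ => by
    rw [show ((pvRank.getD kv.1 (sectionOrder.length : Int)).toNat == sectionOrder.length)
          = ((pvRank.getD kv.1 (sectionOrder.length : Int)).toNat == 11) from rfl,
        pvIdx_eq_top_iff kv.1, Bool.and_comm])]

lemma pv_render_eq (blocks : List (String × String)) (h : (blocks.map Prod.fst).Nodup) :
    render_claude_py blocks = render_claude_py_alt blocks := by
  show PySem.Str.join "\n\n"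
      (blocks.foldl (fun parts kv =>
        if !sectionOrder.contains kv.1 && kv.2 != "" then parts ++ [PySem.Str.strip kv.2] else parts)
        (sectionOrder.foldl (fun parts key =>
          match (PySem.Dict.mk blocks).get? key with
          | some v => if v != "" then parts ++ [PySem.Str.strip v] else parts
          | none => parts) []))
    = PySem.Str.join "\n\n"
      ((blocks.foldl (fun bs kv =>
        if kv.2 != "" then bs.modify (pvRank.getD kv.1 (sectionOrder.length : Int)).toNat (· ++ [PySem.Str.strip kv.2]) else bs)
        (List.replicate (sectionOrder.length + 1) [])).flatten)
  rw [pvA_first, PySem.List.foldl_append_if, pv_buckets_eq, List.range_succ, List.map_append,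
      List.flatten_append, pv_range_map_C blocks h]
  simp [pvC_top]

-- ===== VERDICT (by name: the statement is the Claim_ definition above) =====
theorem render_claude_py_spec : Claim_equal_render_claude_py := by
  intro blocks _hdom hpre
  exact pv_render_eq blocks hpre
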